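-- pv_equiv track=rewrite | github.com/jahirulislammolla/CodeFights | Fights/differentValues.py | differentValues
-- ===== SOURCE A (Python) =====
-- def differentValues(a, d):
--
--     best = -1
--     for i in range(len(a)):
--         for j in range(i + 1, len(a)):
--             diff = abs(a[j] - a[i])
--             if  best<diff and diff<=d :
--                 best = diff
--
--     return best
-- ===== SOURCE B (Python) =====
-- def differentValues(a, d):
--     s = sorted(a)
--     best = -1
--     i = 0
--     for j in range(len(s)):
--         while i < j and s[j] - s[i] > d:
--             i += 1
--         if i < j and s[j] - s[i] > best:
--             best = s[j] - s[i]
--     return best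
-- ===== Notes on version B (the rewrite author's own statement) =====
-- stated objective: faster
-- what changed: A scans all O(n^2) index pairs taking the running max of |a[j]-a[i]| that is <= d; B sorts the list once and sweeps it with a two-pointer window, for each right end j advancing the left pointer i to the smallest index whose difference fits within d, which yields the same maximum.
import Mathlib
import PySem

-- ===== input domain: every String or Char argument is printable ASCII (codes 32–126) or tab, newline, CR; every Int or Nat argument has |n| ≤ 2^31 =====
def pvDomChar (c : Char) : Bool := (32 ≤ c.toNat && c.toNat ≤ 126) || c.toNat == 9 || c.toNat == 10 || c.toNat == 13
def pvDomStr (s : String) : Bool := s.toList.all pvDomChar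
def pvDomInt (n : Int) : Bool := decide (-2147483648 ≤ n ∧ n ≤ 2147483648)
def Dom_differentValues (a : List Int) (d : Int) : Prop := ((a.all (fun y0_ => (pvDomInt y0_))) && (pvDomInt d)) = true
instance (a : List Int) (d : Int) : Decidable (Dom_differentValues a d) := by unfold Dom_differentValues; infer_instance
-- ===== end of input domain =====

-- B replaces A's scan of all pairs by sort + a two-pointer sweep; return values proved equal.

-- ===== PORT A =====
def differentValues (a : List Int) (d : Int) : Int :=
  (PySem.List.pyRange 0 (a.length : Int) 1).foldl (fun best i =>
    (PySem.List.pyRange (i + 1) (a.length : Int) 1).foldl (fun best j =>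
      let diff := |PySem.List.pyGetD a j 0 - PySem.List.pyGetD a i 0|
      if best < diff ∧ diff ≤ d then diff else best) best) (-1)

-- ===== PORT B =====
-- inner `while i < j and s[j] - s[i] > d: i += 1`
def bAdvance (s : List Int) (d : Int) (j i : Nat) : Nat :=
  if _h : i < j ∧ PySem.List.pyGetD s (j : Int) 0 - PySem.List.pyGetD s (i : Int) 0 > d then
    bAdvance s d j (i + 1)
  else i
termination_by j - i
decreasing_by omega

-- outer `for j in range(len(s))` carrying (i, best)
def bLoop (s : List Int) (d : Int) (j i : Nat) (best : Int) : Int :=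
  if _h : j < s.length then
    let i' := bAdvance s d j i
    let cand := PySem.List.pyGetD s (j : Int) 0 - PySem.List.pyGetD s (i' : Int) 0
    bLoop s d (j + 1) i' (if i' < j ∧ cand > best then cand else best)
  else best
termination_by s.length - j
decreasing_by omega

def differentValues_alt (a : List Int) (d : Int) : Int :=
  bLoop (PySem.List.sorted a (fun x => x) false) d 0 0 (-1)

-- ===== PRECONDITION & SPEC =====
def Spec_differentValues (a : List Int) (d : Int) (out : Int) : Prop := out = differentValues_alt a d
instance (a : List Int) (d : Int) (out : Int) : Decidable (Spec_differentValues a d out) := by unfold Spec_differentValues; infer_instance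

-- ===== CLAIM (what is proved, stated in full; the proofs are below) =====
def Claim_equal_differentValues : Prop := ∀ (a : List Int) (d : Int), Dom_differentValues a d → Spec_differentValues a d (differentValues a d)

-- ===== LEMMAS AND PROOFS =====

-- the multiset of absolute pairwise differences of a list
def pd : List Int → List Int
  | [] => []
  | x :: t => t.map (fun y => |y - x|) ++ pd t

-- r is the maximum element ≤ d of {x | P x}, or -1 if there is none
def pvMax (d : Int) (P : Int → Prop) (r : Int) : Prop :=
  (r = -1 ∨ (P r ∧ r ≤ d)) ∧ ∀ x, P x → x ≤ d → x ≤ r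

lemma pvMax_congr {d : Int} {P Q : Int → Prop} (h : ∀ x, P x ↔ Q x) {r : Int}
    (hr : pvMax d P r) : pvMax d Q r := by
  obtain ⟨h1, h2⟩ := hr
  refine ⟨?_, fun x hx hxd => h2 x ((h x).2 hx) hxd⟩
  rcases h1 with h1 | ⟨hp, hd⟩
  · exact Or.inl h1
  · exact Or.inr ⟨(h r).1 hp, hd⟩

lemma pvMax_unique {d : Int} {P : Int → Prop} (hpos : ∀ x, P x → 0 ≤ x)
    {r1 r2 : Int} (h1 : pvMax d P r1) (h2 : pvMax d P r2) : r1 = r2 := by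
  obtain ⟨c1, u1⟩ := h1
  obtain ⟨c2, u2⟩ := h2
  rcases c1 with e1 | ⟨p1, d1⟩ <;> rcases c2 with e2 | ⟨p2, d2⟩
  · omega
  · have := u1 r2 p2 d2; have := hpos r2 p2; omega
  · have := u2 r1 p1 d1; have := hpos r1 p1; omega
  · have := u1 r2 p2 d2; have := u2 r1 p1 d1; omega

lemma mem_pd_nonneg {l : List Int} {x : Int} (hx : x ∈ pd l) : 0 ≤ x := by
  induction l with
  | nil => simp [pd] at hx
  | cons v t ih =>
    simp only [pd, List.mem_append, List.mem_map] at hx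
    rcases hx with ⟨y, _, rfl⟩ | hx
    · exact abs_nonneg _
    · exact ih hx

lemma mem_pd {l : List Int} {x : Int} :
    x ∈ pd l ↔ ∃ i j : Nat, i < j ∧ j < l.length ∧ x = |l.getD j 0 - l.getD i 0| := by
  induction l with
  | nil => simp [pd]
  | cons v t ih =>
    simp only [pd, List.mem_append, List.mem_map, ih, List.length_cons]
    constructor
    · rintro (⟨y, hy, rfl⟩ | ⟨i, j, hij, hj, rfl⟩)
      · obtain ⟨k, hk, rfl⟩ := List.mem_iff_getElem.1 hy
        refine ⟨0, k + 1, Nat.succ_pos k, by omega, ?_⟩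
        rw [List.getD_cons_succ, List.getD_cons_zero, List.getD_eq_getElem _ _ hk]
      · exact ⟨i + 1, j + 1, by omega, by omega, by simp⟩
    · rintro ⟨i, j, hij, hj, rfl⟩
      cases i with
      | zero =>
        cases j with
        | zero => omega
        | succ j' =>
          left
          have hj' : j' < t.length := by omega
          refine ⟨t[j'], List.getElem_mem hj', ?_⟩
          rw [List.getD_cons_succ, List.getD_cons_zero, List.getD_eq_getElem _ _ hj']
      | succ i' =>
        cases j with
        | zero => omega
        | succ j' =>
          right
          exact ⟨i', j', by omega, by omega, by simp⟩

lemma pd_perm {l l' : List Int} (h : l.Perm l') : (pd l).Perm (pd l') := by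
  induction h with
  | nil => simp [pd]
  | cons x h ih =>
    simp only [pd]
    exact (h.map fun y => |y - x|).append ih
  | swap x y l =>
    simp only [pd, List.map_cons, List.cons_append]
    rw [abs_sub_comm x y]
    exact List.Perm.cons _ (List.perm_append_comm_assoc _ _ _)
  | trans _ _ ih1 ih2 => exact ih1.trans ih2

-- generic spec of A's running-max fold over any list of candidates
lemma foldl_max_spec (d : Int) (L : List Int) (c : Int) :
    (L.foldl (fun b x => if b < x ∧ x ≤ d then x else b) c = c ∨
      (L.foldl (fun b x => if b < x ∧ x ≤ d then x else b) c ∈ L ∧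
        L.foldl (fun b x => if b < x ∧ x ≤ d then x else b) c ≤ d)) ∧
    c ≤ L.foldl (fun b x => if b < x ∧ x ≤ d then x else b) c ∧
    ∀ x ∈ L, x ≤ d → x ≤ L.foldl (fun b x => if b < x ∧ x ≤ d then x else b) c := by
  induction L generalizing c with
  | nil => simp
  | cons x t ih =>
    simp only [List.foldl_cons]
    obtain ⟨h1, h2, h3⟩ := ih (if c < x ∧ x ≤ d then x else c)
    have hcc' : c ≤ if c < x ∧ x ≤ d then x else c := by split_ifs with h <;> omega
    refine ⟨?_, by omega, ?_⟩
    · rcases h1 with h1 | ⟨hm, hd⟩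
      · rw [h1]
        split_ifs with h
        · exact Or.inr ⟨by simp, h.2⟩
        · exact Or.inl rfl
      · exact Or.inr ⟨List.mem_cons_of_mem _ hm, hd⟩
    · intro y hy hyd
      rcases List.mem_cons.1 hy with rfl | hyt
      · by_cases hcy : c < y
        · have hx : (if c < y ∧ y ≤ d then y else c) = y := by rw [if_pos ⟨hcy, hyd⟩]
          omega
        · omega
      · exact h3 y hyt hyd

-- membership in the candidate list that A's nested loops fold over
lemma mem_LA (a : List Int) (x : Int) :
    x ∈ (PySem.List.pyRange 0 (a.length : Int) 1).flatMap (fun i =>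
        (PySem.List.pyRange (i + 1) (a.length : Int) 1).map
          (fun j => |PySem.List.pyGetD a j 0 - PySem.List.pyGetD a i 0|)) ↔
      x ∈ pd a := by
  rw [mem_pd]
  simp only [List.mem_flatMap, List.mem_map, PySem.List.mem_pyRange_one]
  constructor
  · rintro ⟨i, ⟨hi0, hin⟩, j, ⟨hij, hjn⟩, rfl⟩
    obtain ⟨iN, rfl⟩ := Int.eq_ofNat_of_zero_le hi0
    obtain ⟨jN, rfl⟩ := Int.eq_ofNat_of_zero_le (by omega : (0 : Int) ≤ j)
    refine ⟨iN, jN, by omega, by omega, ?_⟩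
    rw [PySem.List.pyGetD_natCast, PySem.List.pyGetD_natCast]
  · rintro ⟨i, j, hij, hjn, rfl⟩
    refine ⟨(i : Int), ⟨by omega, by omega⟩,
      (j : Int), ⟨by omega, by omega⟩, ?_⟩
    rw [PySem.List.pyGetD_natCast, PySem.List.pyGetD_natCast]

lemma A_pvMax (a : List Int) (d : Int) :
    pvMax d (fun x => x ∈ pd a) (differentValues a d) := by
  have hrw : differentValues a d =
      ((PySem.List.pyRange 0 (a.length : Int) 1).flatMap (fun i =>
        (PySem.List.pyRange (i + 1) (a.length : Int) 1).map
          (fun j => |PySem.List.pyGetD a j 0 - PySem.List.pyGetD a i 0|))).foldl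
        (fun b x => if b < x ∧ x ≤ d then x else b) (-1) := by
    unfold differentValues
    rw [List.foldl_flatMap]
    congr 1
    funext b i
    rw [List.foldl_map]
  obtain ⟨h1, h2, h3⟩ := foldl_max_spec d
    ((PySem.List.pyRange 0 (a.length : Int) 1).flatMap (fun i =>
      (PySem.List.pyRange (i + 1) (a.length : Int) 1).map
        (fun j => |PySem.List.pyGetD a j 0 - PySem.List.pyGetD a i 0|))) (-1)
  rw [hrw]
  constructor
  · rcases h1 with h | ⟨hm, hd⟩
    · exact Or.inl h
    · exact Or.inr ⟨(mem_LA a _).1 hm, hd⟩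
  · intro x hx hxd
    exact h3 x ((mem_LA a x).2 hx) hxd

lemma sorted_getD_mono (a : List Int) {p q : Nat} (hpq : p ≤ q)
    (hq : q < (PySem.List.sorted a (fun x => x) false).length) :
    (PySem.List.sorted a (fun x => x) false).getD p 0 ≤
      (PySem.List.sorted a (fun x => x) false).getD q 0 := by
  rw [List.getD_eq_getElem _ _ (by omega), List.getD_eq_getElem _ _ hq]
  exact PySem.List.sorted_id_getElem_mono a hpq hq

lemma bLoop_stop {s : List Int} {d : Int} {j i : Nat} {best : Int} (h : ¬ j < s.length) :
    bLoop s d j i best = best := by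
  rw [bLoop, dif_neg h]

lemma bLoop_step {s : List Int} {d : Int} {j i : Nat} {best : Int} (h : j < s.length) :
    bLoop s d j i best = bLoop s d (j + 1) (bAdvance s d j i)
      (if bAdvance s d j i < j ∧ s.getD j 0 - s.getD (bAdvance s d j i) 0 > best
        then s.getD j 0 - s.getD (bAdvance s d j i) 0 else best) := by
  rw [bLoop, dif_pos h]
  simp only [PySem.List.pyGetD_natCast]

lemma bAdvance_spec (s : List Int) (d : Int) (j : Nat) :
    ∀ i, i ≤ j →
      i ≤ bAdvance s d j i ∧ bAdvance s d j i ≤ j ∧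
      (∀ k, i ≤ k → k < bAdvance s d j i → s.getD j 0 - s.getD k 0 > d) ∧
      (bAdvance s d j i < j → s.getD j 0 - s.getD (bAdvance s d j i) 0 ≤ d) := by
  suffices H : ∀ fuel i, j - i ≤ fuel → i ≤ j →
      i ≤ bAdvance s d j i ∧ bAdvance s d j i ≤ j ∧
      (∀ k, i ≤ k → k < bAdvance s d j i → s.getD j 0 - s.getD k 0 > d) ∧
      (bAdvance s d j i < j → s.getD j 0 - s.getD (bAdvance s d j i) 0 ≤ d) by
    intro i hij
    exact H (j - i) i le_rfl hij
  intro fuel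
  induction fuel with
  | zero =>
    intro i hle hij
    have hij' : i = j := by omega
    have hcond : ¬ (i < j ∧ PySem.List.pyGetD s (j : Int) 0 - PySem.List.pyGetD s (i : Int) 0 > d) :=
      fun hc => absurd hc.1 (by omega)
    rw [bAdvance, dif_neg hcond]
    exact ⟨le_rfl, hij, fun k hk1 hk2 => by omega, fun h => absurd h (by omega)⟩
  | succ n ihf =>
    intro i hle hij
    by_cases hc : i < j ∧ PySem.List.pyGetD s (j : Int) 0 - PySem.List.pyGetD s (i : Int) 0 > d
    · rw [bAdvance, dif_pos hc]
      obtain ⟨h1, h2, h3, h4⟩ := ihf (i + 1) (by omega) (by omega)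
      refine ⟨by omega, h2, ?_, h4⟩
      intro k hk1 hk2
      rcases Nat.eq_or_lt_of_le hk1 with rfl | hk
      · simpa using hc.2
      · exact h3 k (by omega) hk2
    · rw [bAdvance, dif_neg hc]
      refine ⟨le_rfl, hij, fun k hk1 hk2 => by omega, ?_⟩
      intro hlt
      have hxd : ¬ (PySem.List.pyGetD s (j : Int) 0 - PySem.List.pyGetD s (i : Int) 0 > d) :=
        fun hgt => hc ⟨hlt, hgt⟩
      simpa [not_lt] using hxd

lemma bLoop_spec (s : List Int) (d : Int)
    (mono : ∀ p q : Nat, p ≤ q → q < s.length → s.getD p 0 ≤ s.getD q 0) :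
    ∀ fuel j i best, s.length - j ≤ fuel → i ≤ j → j ≤ s.length →
    (∀ k m : Nat, k < i → j ≤ m → m < s.length → s.getD m 0 - s.getD k 0 > d) →
    (best = -1 ∨ ∃ k l : Nat, k < l ∧ l < j ∧ best = s.getD l 0 - s.getD k 0 ∧ best ≤ d) →
    (∀ k l : Nat, k < l → l < j → s.getD l 0 - s.getD k 0 ≤ d → s.getD l 0 - s.getD k 0 ≤ best) →
    (bLoop s d j i best = -1 ∨ ∃ k l : Nat, k < l ∧ l < s.length ∧
        bLoop s d j i best = s.getD l 0 - s.getD k 0 ∧ bLoop s d j i best ≤ d) ∧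
    (∀ k l : Nat, k < l → l < s.length → s.getD l 0 - s.getD k 0 ≤ d →
        s.getD l 0 - s.getD k 0 ≤ bLoop s d j i best) := by
  intro fuel
  induction fuel with
  | zero =>
    intro j i best hf hij hjn H2 H3 H4
    have hj : j = s.length := by omega
    subst hj
    rw [bLoop_stop (by omega)]
    exact ⟨H3, H4⟩
  | succ n ihf =>
    intro j i best hf hij hjn H2 H3 H4
    by_cases hjlen : j < s.length
    · rw [bLoop_step hjlen]
      obtain ⟨ha1, ha2, ha3, ha4⟩ := bAdvance_spec s d j i hij
      have H2' : ∀ k m : Nat, k < bAdvance s d j i → j + 1 ≤ m → m < s.length →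
          s.getD m 0 - s.getD k 0 > d := by
        intro k m hk hm1 hm2
        by_cases hki : k < i
        · exact H2 k m hki (by omega) hm2
        · have h3 := ha3 k (by omega) hk
          have := mono j m (by omega) hm2
          omega
      have H3' : (if bAdvance s d j i < j ∧ s.getD j 0 - s.getD (bAdvance s d j i) 0 > best
            then s.getD j 0 - s.getD (bAdvance s d j i) 0 else best) = -1 ∨
          ∃ k l : Nat, k < l ∧ l < j + 1 ∧
            (if bAdvance s d j i < j ∧ s.getD j 0 - s.getD (bAdvance s d j i) 0 > best
              then s.getD j 0 - s.getD (bAdvance s d j i) 0 else best) = s.getD l 0 - s.getD k 0 ∧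
            (if bAdvance s d j i < j ∧ s.getD j 0 - s.getD (bAdvance s d j i) 0 > best
              then s.getD j 0 - s.getD (bAdvance s d j i) 0 else best) ≤ d := by
        by_cases hcond : bAdvance s d j i < j ∧ s.getD j 0 - s.getD (bAdvance s d j i) 0 > best
        · rw [if_pos hcond]
          exact Or.inr ⟨bAdvance s d j i, j, hcond.1, by omega, rfl, ha4 hcond.1⟩
        · rw [if_neg hcond]
          rcases H3 with h | ⟨k, l, h1, h2, h3, h4⟩
          · exact Or.inl h
          · exact Or.inr ⟨k, l, h1, by omega, h3, h4⟩
      have H4' : ∀ k l : Nat, k < l → l < j + 1 → s.getD l 0 - s.getD k 0 ≤ d →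
          s.getD l 0 - s.getD k 0 ≤
            (if bAdvance s d j i < j ∧ s.getD j 0 - s.getD (bAdvance s d j i) 0 > best
              then s.getD j 0 - s.getD (bAdvance s d j i) 0 else best) := by
        intro k l hkl hl hle
        have hbb : best ≤ (if bAdvance s d j i < j ∧ s.getD j 0 - s.getD (bAdvance s d j i) 0 > best
            then s.getD j 0 - s.getD (bAdvance s d j i) 0 else best) := by
          split_ifs with h <;> omega
        rcases Nat.lt_succ_iff_lt_or_eq.1 hl with hlj | heq
        · have := H4 k l hkl hlj hle
          omega
        · rw [heq] at hkl hle ⊢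
          by_cases hki' : k < bAdvance s d j i
          · by_cases hki : k < i
            · have := H2 k j hki le_rfl hjlen
              omega
            · have := ha3 k (by omega) hki'
              omega
          · have hmk := mono (bAdvance s d j i) k (by omega) (by omega)
            by_cases hcond : bAdvance s d j i < j ∧ s.getD j 0 - s.getD (bAdvance s d j i) 0 > best
            · rw [if_pos hcond]
              omega
            · rw [if_neg hcond]
              have hnb : ¬ (s.getD j 0 - s.getD (bAdvance s d j i) 0 > best) :=
                fun hgt => hcond ⟨by omega, hgt⟩
              omega
      have hf' : s.length - (j + 1) ≤ n := by clear H2 H3 H4 H2' H3' H4' ha3 ha4; omega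
      have hij' : bAdvance s d j i ≤ j + 1 := by clear H2 H3 H4 H2' H3' H4' ha3 ha4; omega
      have hjn' : j + 1 ≤ s.length := by clear H2 H3 H4 H2' H3' H4' ha3 ha4; omega
      exact ihf (j + 1) (bAdvance s d j i)
        (if bAdvance s d j i < j ∧ s.getD j 0 - s.getD (bAdvance s d j i) 0 > best
          then s.getD j 0 - s.getD (bAdvance s d j i) 0 else best)
        hf' hij' hjn' H2' H3' H4'
    · rw [bLoop_stop hjlen]
      have hj : j = s.length := by omega
      subst hj
      exact ⟨H3, H4⟩

lemma B_pvMax (a : List Int) (d : Int) :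
    pvMax d (fun x => x ∈ pd (PySem.List.sorted a (fun x => x) false))
      (differentValues_alt a d) := by
  unfold differentValues_alt
  obtain ⟨hc, hub⟩ := bLoop_spec (PySem.List.sorted a (fun x => x) false) d
    (fun p q hpq hq => sorted_getD_mono a hpq hq)
    ((PySem.List.sorted a (fun x => x) false).length) 0 0 (-1)
    (by omega) (by omega) (by omega)
    (by intro k m hk _ _; omega)
    (Or.inl rfl)
    (by intro k l _ hl _; omega)
  constructor
  · rcases hc with h | ⟨k, l, h1, h2, h3, h4⟩
    · exact Or.inl h
    · refine Or.inr ⟨mem_pd.2 ⟨k, l, h1, h2, ?_⟩, h4⟩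
      rw [h3, abs_of_nonneg (by have := sorted_getD_mono a (le_of_lt h1) h2; omega)]
  · intro x hx hxd
    obtain ⟨k, l, h1, h2, h3⟩ := mem_pd.1 hx
    have hnn : 0 ≤ (PySem.List.sorted a (fun x => x) false).getD l 0 -
        (PySem.List.sorted a (fun x => x) false).getD k 0 := by
      have := sorted_getD_mono a (le_of_lt h1) h2
      omega
    rw [h3, abs_of_nonneg hnn] at hxd ⊢
    exact hub k l h1 h2 hxd

-- ===== VERDICT (by name: the statement is the Claim_ definition above) =====
theorem differentValues_spec : Claim_equal_differentValues := by
  intro a d _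
  unfold Spec_differentValues
  have hA := A_pvMax a d
  have hB := B_pvMax a d
  have hperm := pd_perm (PySem.List.sorted_perm a (fun x => x) false)
  have hB' : pvMax d (fun x => x ∈ pd a) (differentValues_alt a d) :=
    pvMax_congr (fun x => hperm.mem_iff) hB
  exact pvMax_unique (fun x hx => mem_pd_nonneg hx) hA hB'
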